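-- pv_equiv track=rewrite | github.com/FranciscoAT/aoc-2018 | 2020/day14/part2.py | recurse_memeory_locations
-- ===== SOURCE A (Python) =====
-- from typing import Iterable, List, Tuple
--
-- def recurse_memeory_locations(memory_list: List[str]) -> List[List[str]]:
--     if "X" not in memory_list:
--         return [memory_list]
--
--     x_index = memory_list.index("X")
--
--     variation_0 = memory_list.copy()
--     variation_0[x_index] = "0"
--     variation_1 = memory_list.copy()
--     variation_1[x_index] = "1"
--
--     output = []
--     for variation in [variation_0, variation_1]:
--         output.extend(recurse_memeory_locations(variation))
--
--     return output
-- ===== SOURCE B (Python) =====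
-- from typing import List
--
--
-- def recurse_memeory_locations(memory_list: List[str]) -> List[List[str]]:
--     variants = [memory_list]
--     for i, c in enumerate(memory_list):
--         if c == "X":
--             variants = [v[:i] + [b] + v[i + 1:] for v in variants for b in ("0", "1")]
--     return variants
-- ===== Notes on version B (the rewrite author's own statement) =====
-- stated objective: idiomatic
-- what changed: Replaces the find-first-X recursion (which rescans the list from the start on every call) with a single left-to-right pass over enumerate(memory_list) that doubles the list of variants at each 'X' via a flat comprehension.
import Mathlib
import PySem

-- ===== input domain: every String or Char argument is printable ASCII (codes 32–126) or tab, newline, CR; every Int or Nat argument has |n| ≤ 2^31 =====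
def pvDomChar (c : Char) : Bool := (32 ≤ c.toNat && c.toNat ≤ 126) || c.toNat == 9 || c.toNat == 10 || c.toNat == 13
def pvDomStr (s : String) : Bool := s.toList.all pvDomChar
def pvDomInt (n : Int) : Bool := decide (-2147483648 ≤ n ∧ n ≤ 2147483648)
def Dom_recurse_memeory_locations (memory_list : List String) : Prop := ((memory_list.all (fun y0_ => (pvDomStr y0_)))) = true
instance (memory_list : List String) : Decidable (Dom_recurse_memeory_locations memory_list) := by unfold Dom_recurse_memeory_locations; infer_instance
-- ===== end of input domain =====

-- B replaces the find-first-X recursion with one left-to-right pass that doubles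
-- the variant list at each "X" (idiomatic single pass; return value only).


-- ===== PORT A =====
-- termination helper for the well-founded recursion of A's port (cited in decreasing_by)
lemma pv_count_lt (pre suf : List String) (b : String) (hb : b ≠ "X") :
    (pre ++ b :: suf).count "X" < (pre ++ "X" :: suf).count "X" := by
  simp [List.count_append, hb]

lemma pv_set_append (pre suf : List String) (c b : String) :
    (pre ++ c :: suf).set pre.length b = pre ++ b :: suf := by
  induction pre with
  | nil => simp
  | cons x t ih => simp [ih]

def recurse_memeory_locations (memory_list : List String) : List (List String) :=
  if "X" ∉ memory_list then [memory_list]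
  else
    match h : PySem.List.index? memory_list "X" with
    | none => [memory_list]  -- unreachable: "X" ∈ memory_list guarantees index? = some _
    | some x_index =>
      let variation_0 := PySem.List.pySetD memory_list (x_index : Int) "0"
      let variation_1 := PySem.List.pySetD memory_list (x_index : Int) "1"
      -- output = []; for variation in [variation_0, variation_1]: output.extend(recurse(variation))
      let output : List (List String) := []
      let output := output ++ recurse_memeory_locations variation_0
      let output := output ++ recurse_memeory_locations variation_1
      output
termination_by memory_list.count "X"
decreasing_by
  · obtain ⟨pre, suf, hdec, hlen, -⟩ := (PySem.List.index?_eq_some_iff _ _ _).1 h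
    subst hdec hlen
    simp only [PySem.List.pySetD_natCast, pv_set_append]
    exact pv_count_lt pre suf "0" (by decide)
  · obtain ⟨pre, suf, hdec, hlen, -⟩ := (PySem.List.index?_eq_some_iff _ _ _).1 h
    subst hdec hlen
    simp only [PySem.List.pySetD_natCast, pv_set_append]
    exact pv_count_lt pre suf "1" (by decide)

-- ===== PORT B =====
def recurse_memeory_locations_alt (memory_list : List String) : List (List String) :=
  (PySem.List.enumerate memory_list).foldl
    (fun variants p =>
      if p.2 == "X" then
        variants.flatMap (fun v =>
          ["0", "1"].map (fun b =>
            PySem.List.slice v none (some p.1) ++ [b] ++ PySem.List.slice v (some (p.1 + 1)) none))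
      else variants)
    [memory_list]

-- ===== PRECONDITION & SPEC =====
def Spec_recurse_memeory_locations (memory_list : List String) (out : List (List String)) : Prop := out = recurse_memeory_locations_alt memory_list
instance (memory_list : List String) (out : List (List String)) : Decidable (Spec_recurse_memeory_locations memory_list out) := by unfold Spec_recurse_memeory_locations; infer_instance

-- ===== CLAIM (what is proved, stated in full; the proofs are below) =====
def Claim_equal_recurse_memeory_locations : Prop := ∀ (memory_list : List String), Dom_recurse_memeory_locations memory_list → Spec_recurse_memeory_locations memory_list (recurse_memeory_locations memory_list)

-- ===== LEMMAS AND PROOFS =====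

-- the body of B's fold, named for the proofs
def pvStep (variants : List (List String)) (p : Int × String) : List (List String) :=
  if p.2 == "X" then
    variants.flatMap (fun v =>
      ["0", "1"].map (fun b =>
        PySem.List.slice v none (some p.1) ++ [b] ++ PySem.List.slice v (some (p.1 + 1)) none))
  else variants

def pvGo (ps : List (Int × String)) (S : List (List String)) : List (List String) :=
  ps.foldl pvStep S

lemma pv_alt_eq_go (l : List String) :
    recurse_memeory_locations_alt l = pvGo (PySem.List.enumerate l) [l] := rfl

lemma pvGo_append_state (ps : List (Int × String)) (S T : List (List String)) :
    pvGo ps (S ++ T) = pvGo ps S ++ pvGo ps T := by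
  induction ps generalizing S T with
  | nil => simp [pvGo]
  | cons p t ih =>
    have hstep : pvStep (S ++ T) p = pvStep S p ++ pvStep T p := by
      unfold pvStep; split <;> simp [List.flatMap_append]
    simp only [pvGo, List.foldl_cons] at *
    rw [hstep, ih]

lemma pvGo_noX (ps : List (Int × String)) (S : List (List String))
    (h : ∀ p ∈ ps, p.2 ≠ "X") : pvGo ps S = S := by
  induction ps generalizing S with
  | nil => rfl
  | cons p t ih =>
    have hp : p.2 ≠ "X" := h p (by simp)
    simp only [pvGo, List.foldl_cons]
    rw [show pvStep S p = S by unfold pvStep; simp [hp]]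
    exact ih S (fun q hq => h q (by simp [hq]))

lemma pv_enum_snd_ne (l : List String) (s : Int) (hl : "X" ∉ l) :
    ∀ p ∈ PySem.List.enumerate l s, p.2 ≠ "X" := by
  intro p hp
  obtain ⟨k, hk, rfl⟩ := (PySem.List.mem_enumerate_iff _ _ _).1 hp
  exact fun hx => hl (hx ▸ l.getElem_mem hk)

lemma pv_drop_append (pre suf : List String) (c : String) :
    (pre ++ c :: suf).drop (pre.length + 1) = suf := by
  induction pre with
  | nil => simp
  | cons x t ih => simp [ih]

-- the fold step at the first "X": the two slice-splices are exactly the two set-variants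
lemma pvStep_at_X (pre suf : List String) (c : String) :
    pvStep [pre ++ c :: suf] ((pre.length : Int), "X")
      = [pre ++ "0" :: suf, pre ++ "1" :: suf] := by
  unfold pvStep
  have h2 : PySem.List.slice (pre ++ c :: suf) (some ((pre.length : Int) + 1)) none
      = suf := by
    rw [show ((pre.length : Int) + 1) = ((pre.length + 1 : Nat) : Int) by push_cast; ring,
      PySem.List.slice_from_natCast, pv_drop_append]
  simp [h2]

lemma pv_alt_step (pre suf : List String) (hpre : "X" ∉ pre) :
    recurse_memeory_locations_alt (pre ++ "X" :: suf)
      = recurse_memeory_locations_alt (pre ++ "0" :: suf)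
        ++ recurse_memeory_locations_alt (pre ++ "1" :: suf) := by
  have henum : ∀ (c : String),
      PySem.List.enumerate (pre ++ c :: suf)
        = PySem.List.enumerate pre 0 ++ ((pre.length : Int), c)
            :: PySem.List.enumerate suf ((pre.length : Int) + 1) := by
    intro c
    rw [PySem.List.enumerate_append, PySem.List.enumerate_cons]
    norm_num
  have hskip : ∀ (c : String) (hc : c ≠ "X") (v : List String),
      pvGo (PySem.List.enumerate (pre ++ c :: suf)) [v]
        = pvGo (PySem.List.enumerate suf ((pre.length : Int) + 1)) [v] := by
    intro c hc v
    rw [henum c]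
    simp only [pvGo, List.foldl_append, List.foldl_cons]
    rw [show (PySem.List.enumerate pre 0).foldl pvStep [v] = [v] from
      pvGo_noX _ _ (pv_enum_snd_ne pre 0 hpre)]
    rw [show pvStep [v] ((pre.length : Int), c) = [v] by unfold pvStep; simp [hc]]
  rw [pv_alt_eq_go, pv_alt_eq_go, pv_alt_eq_go]
  rw [hskip "0" (by decide), hskip "1" (by decide)]
  rw [henum "X"]
  simp only [pvGo, List.foldl_append, List.foldl_cons]
  rw [show (PySem.List.enumerate pre 0).foldl pvStep [pre ++ "X" :: suf]
      = [pre ++ "X" :: suf] from pvGo_noX _ _ (pv_enum_snd_ne pre 0 hpre)]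
  rw [show pvStep [pre ++ "X" :: suf] ((pre.length : Int), "X")
      = [pre ++ "0" :: suf] ++ [pre ++ "1" :: suf] from pvStep_at_X pre suf "X"]
  exact pvGo_append_state _ _ _

lemma pv_main (N : Nat) : ∀ (l : List String), l.count "X" ≤ N →
    recurse_memeory_locations l = recurse_memeory_locations_alt l := by
  induction N with
  | zero =>
    intro l hc
    have hnotin : "X" ∉ l := by
      intro hmem
      exact absurd (List.count_pos_iff.2 hmem) (by omega)
    rw [recurse_memeory_locations, if_pos hnotin, pv_alt_eq_go,
      pvGo_noX _ _ (pv_enum_snd_ne l 0 hnotin)]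
  | succ n ih =>
    intro l hc
    by_cases hmem : "X" ∈ l
    · obtain ⟨i, hi⟩ := Option.isSome_iff_exists.1
        ((PySem.List.index?_isSome_iff _ _).2 hmem)
      obtain ⟨pre, suf, hdec, hlen, hpre⟩ := (PySem.List.index?_eq_some_iff _ _ _).1 hi
      rw [recurse_memeory_locations, if_neg (by simpa using hmem), hi]
      simp only [PySem.List.pySetD_natCast]
      subst hdec hlen
      rw [pv_set_append, pv_set_append]
      have hcount : ∀ (b : String), b ≠ "X" → (pre ++ b :: suf).count "X" ≤ n := by
        intro b hb
        have := pv_count_lt pre suf b hb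
        omega
      rw [List.nil_append, ih _ (hcount "0" (by decide)), ih _ (hcount "1" (by decide)),
        pv_alt_step pre suf hpre]
    · rw [recurse_memeory_locations, if_pos hmem, pv_alt_eq_go,
        pvGo_noX _ _ (pv_enum_snd_ne l 0 hmem)]

-- ===== VERDICT (by name: the statement is the Claim_ definition above) =====
theorem recurse_memeory_locations_spec : Claim_equal_recurse_memeory_locations := by
  intro l _
  exact pv_main (l.count "X") l le_rfl
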